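-- pv_equiv track=rewrite | github.com/sboora/stringsync | app.py | filter_consecutive_notes
-- ===== SOURCE A (Python) =====
-- def filter_consecutive_notes(notes, min_consecutive=2):
--     """
--     Filters out notes that don't appear consecutively at least `min_consecutive` times.
--
--     Parameters:
--         notes (list): List of detected notes.
--         min_consecutive (int): Minimum number of consecutive occurrences for a note to be considered.
--
--     Returns:
--         list: List of filtered notes.
--     """
--     filtered_notes = []
--     prev_note = None
--     count = 0
--     for note in notes:
--         if note == prev_note:
--             count += 1
--         else:
--             count = 1
--         if count == min_consecutive:
--             filtered_notes.append(note)
--         prev_note = note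
--     filtered_notes = list(dict.fromkeys(filtered_notes))
--     return filtered_notes
-- ===== SOURCE B (Python) =====
-- def filter_consecutive_notes(notes, min_consecutive=2):
--     # Two-pointer skip-scan: test the window of length min_consecutive starting
--     # at i; on a mismatch jump straight to it, on success emit the note (seen-set
--     # dedup) and jump past the rest of the run.  Thresholds < 1 keep nothing.
--     if min_consecutive < 1:
--         return []
--     n = len(notes)
--     result = []
--     seen = set()
--     i = 0
--     while i + min_consecutive <= n:
--         note = notes[i]
--         j = i + 1
--         while j < i + min_consecutive and notes[j] == note:
--             j += 1
--         if j == i + min_consecutive: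
--             if note not in seen:
--                 seen.add(note)
--                 result.append(note)
--             while j < n and notes[j] == note:
--                 j += 1
--         i = j
--     return result
-- ===== Notes on version B (the rewrite author's own statement) =====
-- stated objective: alternative
-- what changed: Replaces A's run-counter state machine plus dict.fromkeys post-dedup with a two-pointer skip-scan: it tests the min_consecutive-length window at i, jumps straight to the first mismatch on failure or past the rest of the run on success, and deduplicates in-scan with a seen set (thresholds < 1 return [] directly).
import Mathlib
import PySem

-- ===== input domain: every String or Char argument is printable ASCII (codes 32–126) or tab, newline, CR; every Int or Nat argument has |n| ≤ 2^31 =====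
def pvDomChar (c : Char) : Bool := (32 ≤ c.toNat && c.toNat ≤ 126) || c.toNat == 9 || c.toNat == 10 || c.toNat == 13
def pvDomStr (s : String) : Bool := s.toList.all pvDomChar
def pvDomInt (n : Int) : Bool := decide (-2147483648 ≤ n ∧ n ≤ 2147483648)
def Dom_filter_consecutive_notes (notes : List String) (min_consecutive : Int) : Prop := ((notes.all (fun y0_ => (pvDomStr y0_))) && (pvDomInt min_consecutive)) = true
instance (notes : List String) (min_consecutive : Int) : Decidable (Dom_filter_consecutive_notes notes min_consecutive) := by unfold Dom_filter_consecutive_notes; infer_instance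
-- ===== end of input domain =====

-- B replaces A's run-counter state machine (+ dict.fromkeys post-pass) with a two-pointer
-- skip-scan: it tests the min_consecutive-length window starting at i, jumps to the first
-- mismatch on failure or past the run on success, deduplicating in-scan with a seen set
-- (alternative algorithm, same return value).

-- ===== PORT A =====
-- A's for-loop over notes with state (filtered_notes, prev_note, count)
def fcnLoopA (m : Int) : List String → List String → Option String → Int → List String
  | [], acc, _, _ => acc
  | note :: rest, acc, prev, count =>
    let count' := if (some note) == prev then count + 1 else (1 : Int)
    let acc' := if count' == m then acc ++ [note] else acc
    fcnLoopA m rest acc' (some note) count'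

def filter_consecutive_notes (notes : List String) (min_consecutive : Int) : List String :=
  -- list(dict.fromkeys(...)) is PySem.List.dedup (exact)
  PySem.List.dedup (fcnLoopA min_consecutive notes [] none 0)

-- ===== PORT B =====
-- inner 'while j < stop and notes[j] == note: j += 1' (stop = i + min_consecutive);
-- the fuel argument is an iteration bound making the loop structurally recursive (the
-- callers pass exactly the number of indices left below stop, so it never runs out)
def fcnInner1 (notes : List String) (note : String) (stop : Int) : Nat → Int → Int
  | 0, j => j
  | fuel + 1, j =>
    if j < stop then
      (if PySem.List.pyGetD notes j "" == note then fcnInner1 notes note stop fuel (j + 1) else j)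
    else j

-- inner 'while j < n and notes[j] == note: j += 1' (same fuel convention)
def fcnInner2 (notes : List String) (note : String) (n : Int) : Nat → Int → Int
  | 0, j => j
  | fuel + 1, j =>
    if j < n then
      (if PySem.List.pyGetD notes j "" == note then fcnInner2 notes note n fuel (j + 1) else j)
    else j

-- outer 'while i + min_consecutive <= n' loop with state (result, seen, i); i moves
-- right by at least one per iteration, so the caller's fuel bound suffices
def fcnOuter (notes : List String) (m n : Int) : Nat → List String → PySem.Set String → Int → List String
  | 0, result, _, _ => result
  | fuel + 1, result, seen, i =>
    if i + m ≤ n then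
      let note := PySem.List.pyGetD notes i ""
      let j := fcnInner1 notes note (i + m) (m - 1).toNat (i + 1)
      if j == i + m then
        if seen.contains note then
          fcnOuter notes m n fuel result seen (fcnInner2 notes note n (n - j).toNat j)
        else
          fcnOuter notes m n fuel (result ++ [note]) (PySem.Set.add seen note)
            (fcnInner2 notes note n (n - j).toNat j)
      else
        fcnOuter notes m n fuel result seen j
    else result

def filter_consecutive_notes_alt (notes : List String) (min_consecutive : Int) : List String :=
  if min_consecutive < 1 then []
  else fcnOuter notes min_consecutive (notes.length : Int)
    ((notes.length : Int) - min_consecutive + 1).toNat [] PySem.Set.empty 0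

-- ===== PRECONDITION & SPEC =====
def Spec_filter_consecutive_notes (notes : List String) (min_consecutive : Int) (out : List String) : Prop := out = filter_consecutive_notes_alt notes min_consecutive
instance (notes : List String) (min_consecutive : Int) (out : List String) : Decidable (Spec_filter_consecutive_notes notes min_consecutive out) := by unfold Spec_filter_consecutive_notes; infer_instance

-- ===== CLAIM (what is proved, stated in full; the proofs are below) =====
def Claim_equal_filter_consecutive_notes : Prop := ∀ (notes : List String) (min_consecutive : Int), Dom_filter_consecutive_notes notes min_consecutive → Spec_filter_consecutive_notes notes min_consecutive (filter_consecutive_notes notes min_consecutive)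

-- ===== LEMMAS AND PROOFS =====

-- Reference function: one note per maximal run whose length reaches the threshold.
def fcnRunsB (m : Int) : List String → List String
  | [] => []
  | note :: rest =>
    let run_length : Int := ((rest.takeWhile (fun x => x == note)).length : Int) + 1
    (if 1 ≤ m ∧ m ≤ run_length then [note] else []) ++
      fcnRunsB m (rest.dropWhile (fun x => x == note))
  termination_by l => l.length
  decreasing_by
    simp only [List.length_cons]
    exact Nat.lt_succ_of_le (List.length_dropWhile_le _ _)

-- Reference function: B's window hits read structurally — notes[p] for every suffix
-- position p whose first mN elements are equal (duplicates per run kept).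
def fcnHits (mN : Nat) : List String → List String
  | [] => []
  | x :: rest =>
    (if mN ≤ 1 + (rest.takeWhile (fun y => y == x)).length then [x] else []) ++ fcnHits mN rest

-- A-SIDE. Mid-run invariant: with previous note n and current run count c, A's loop appends n
-- exactly when the counter passes m inside the rest of the run, then proceeds run by run.
theorem fcnLoopA_run (m : Int) :
    ∀ (rest : List String) (n : String) (acc : List String) (c : Int),
      fcnLoopA m rest acc (some n) c =
        acc ++ (if c < m ∧ m ≤ c + ((rest.takeWhile (fun x => x == n)).length : Int)
                then [n] else []) ++
          fcnRunsB m (rest.dropWhile (fun x => x == n)) := by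
  intro rest
  induction rest with
  | nil =>
    intro n acc c
    simp [fcnLoopA, fcnRunsB]
  | cons x rest' ih =>
    intro n acc c
    by_cases hx : x = n
    · subst hx
      simp only [fcnLoopA, beq_self_eq_true, if_pos]
      rw [ih x _ (c + 1), List.takeWhile_cons_of_pos (p := fun y => y == x) (by simp),
        List.dropWhile_cons_of_pos (p := fun y => y == x) (by simp)]
      simp only [List.length_cons]
      by_cases hm : c + 1 = m
      · rw [if_pos (show (c + 1 == m) = true from beq_iff_eq.mpr hm)]
        rw [if_neg (by omega), if_pos (by push_cast; omega)]
        simp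
      · rw [if_neg (show ¬ (c + 1 == m) = true by simpa using hm)]
        rw [List.append_assoc, List.append_assoc]
        congr 1
        have hcast : ∀ k : Nat, (c + 1 < m ∧ m ≤ c + 1 + (k : Int)) ↔
            (c < m ∧ m ≤ c + ((k : Int) + 1)) := by
          intro k; constructor <;> intro h <;> constructor <;> push_cast at * <;> omega
        split_ifs with h1 h2 h2
        · rfl
        · exact absurd ((hcast _).mp h1) h2
        · exact absurd ((hcast _).mpr h2) h1
        · rfl
    · have hsx : (some x == some n) = false := by simp [hx]
      simp only [fcnLoopA, hsx, Bool.false_eq_true, if_false]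
      rw [ih x _ 1, List.takeWhile_cons_of_neg (p := fun y => y == n) (by simpa using hx),
        List.dropWhile_cons_of_neg (p := fun y => y == n) (by simpa using hx)]
      simp only [List.length_nil, Int.natCast_zero, add_zero]
      rw [if_neg (show ¬ (c < m ∧ m ≤ c) by omega)]
      simp only [List.append_nil]
      rw [fcnRunsB]
      by_cases hm : (1 : Int) = m
      · rw [if_pos (show ((1 : Int) == m) = true from beq_iff_eq.mpr hm)]
        rw [if_neg (by omega), if_pos (by constructor <;> [omega; (push_cast; omega)])]
        simp
      · rw [if_neg (show ¬ ((1 : Int) == m) = true by simpa using hm)]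
        rw [List.append_assoc]
        congr 1
        have hcast : ∀ k : Nat, ((1 : Int) < m ∧ m ≤ 1 + (k : Int)) ↔
            (1 ≤ m ∧ m ≤ (k : Int) + 1) := by
          intro k; constructor <;> intro h <;> omega
        split_ifs with h1 h2 h2
        · rfl
        · exact absurd ((hcast _).mp h1) h2
        · exact absurd ((hcast _).mpr h2) h1
        · rfl

theorem fcnLoopA_eq_fcnRunsB (m : Int) (notes : List String) :
    fcnLoopA m notes [] none 0 = fcnRunsB m notes := by
  cases notes with
  | nil => simp [fcnLoopA, fcnRunsB]
  | cons n rest =>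
    have hsn : (some n == (none : Option String)) = false := by simp
    simp only [fcnLoopA, hsn, Bool.false_eq_true, if_false]
    rw [fcnLoopA_run m rest n _ 1]
    rw [fcnRunsB]
    by_cases hm : (1 : Int) = m
    · rw [if_pos (show ((1 : Int) == m) = true from beq_iff_eq.mpr hm)]
      rw [if_neg (by omega), if_pos (by constructor <;> [omega; (push_cast; omega)])]
      simp
    · rw [if_neg (show ¬ ((1 : Int) == m) = true by simpa using hm)]
      have hcast : ∀ k : Nat, ((1 : Int) < m ∧ m ≤ 1 + (k : Int)) ↔
          (1 ≤ m ∧ m ≤ (k : Int) + 1) := by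
        intro k; constructor <;> intro h <;> omega
      simp only [List.nil_append]
      congr 1
      split_ifs with h1 h2 h2
      · rfl
      · exact absurd ((hcast _).mp h1) h2
      · exact absurd ((hcast _).mpr h2) h1
      · rfl

-- With a non-positive threshold no run qualifies.
theorem fcnRunsB_of_lt_one (m : Int) (hm : m < 1) : ∀ (l : List String), fcnRunsB m l = [] := by
  intro l
  induction hn : l.length using Nat.strong_induction_on generalizing l with
  | _ n ih =>
    cases l with
    | nil => simp [fcnRunsB]
    | cons x rest =>
      rw [fcnRunsB, if_neg (by omega)]
      subst hn
      rw [ih _ (Nat.lt_succ_of_le (List.length_dropWhile_le _ _)) _ rfl]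
      simp

-- A list shorter than the threshold has no qualifying run.
theorem fcnRunsB_short (m : Int) :
    ∀ (n : Nat) (l : List String), l.length = n → (l.length : Int) < m → fcnRunsB m l = [] := by
  intro n
  induction n using Nat.strong_induction_on with
  | _ n ih =>
    intro l hn hlt
    cases l with
    | nil => simp [fcnRunsB]
    | cons x rest =>
      rw [fcnRunsB, if_neg (by
        have := (List.takeWhile_sublist (fun y => y == x) (l := rest)).length_le
        simp only [List.length_cons] at hlt
        push_cast at hlt ⊢
        omega)]
      rw [ih ((rest.dropWhile (fun y => y == x)).length)
        (by
          subst hn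
          simp only [List.length_cons]
          exact Nat.lt_succ_of_le (List.length_dropWhile_le _ _))
        _ rfl
        (by
          have := (List.dropWhile_sublist (p := fun y => y == x) (l := rest)).length_le
          simp only [List.length_cons] at hlt
          push_cast at hlt ⊢
          omega)]
      simp

-- taking s elements off the front of a list shortens its takeWhile prefix by s
theorem pvTakeWhileDrop (p : String → Bool) :
    ∀ (l : List String) (s : Nat), s ≤ (l.takeWhile p).length →
      ((l.drop s).takeWhile p).length = (l.takeWhile p).length - s := by
  intro l
  induction l with
  | nil =>
    intro s hs
    simp only [List.takeWhile_nil, List.length_nil, Nat.le_zero] at hs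
    subst hs
    rfl
  | cons x l' ih =>
    intro s hs
    cases s with
    | zero => simp
    | succ s' =>
      by_cases hp : p x
      · rw [List.takeWhile_cons_of_pos hp] at hs ⊢
        simp only [List.length_cons] at hs ⊢
        rw [List.drop_succ_cons, ih s' (by omega)]
        omega
      · rw [List.takeWhile_cons_of_neg hp] at hs
        simp at hs

-- dropWhile is drop of the takeWhile length
theorem pvDropWhileEq (p : String → Bool) :
    ∀ (l : List String), l.dropWhile p = l.drop (l.takeWhile p).length := by
  intro l
  induction l with
  | nil => simp
  | cons x l' ih =>
    by_cases hp : p x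
    · rw [List.takeWhile_cons_of_pos hp, List.dropWhile_cons_of_pos hp, List.length_cons,
        List.drop_succ_cons, ih]
    · rw [List.takeWhile_cons_of_neg hp, List.dropWhile_cons_of_neg hp]
      simp

-- notes[j] read through the suffix notes.drop j.toNat
theorem pvGetDHead (notes : List String) (j : Int) (x : String) (r : List String)
    (h0 : 0 ≤ j) (hdrop : notes.drop j.toNat = x :: r) :
    PySem.List.pyGetD notes j "" = x := by
  have hj : j.toNat < notes.length := by
    by_contra h
    rw [List.drop_eq_nil_iff.mpr (by omega)] at hdrop
    simp at hdrop
  rw [PySem.List.pyGetD_eq_getElem notes "" h0 (by omega)]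
  have h : notes[j.toNat]? = some x := by
    have h2 := List.getElem?_drop (xs := notes) (i := j.toNat) (j := 0)
    rw [hdrop] at h2
    simpa using h2.symm
  obtain ⟨hlt, hx⟩ := List.getElem?_eq_some_iff.mp h
  exact hx

theorem pvDropSucc (notes : List String) (k : Nat) (x : String) (r : List String)
    (hdrop : notes.drop k = x :: r) : notes.drop (k + 1) = r := by
  have := congrArg (List.drop 1) hdrop
  rw [List.drop_drop] at this
  simpa using this

-- the first inner while: advance up to k steps while the suffix keeps matching note
theorem pvInner1Eq (notes : List String) (note : String) :
    ∀ (k : Nat) (j : Int), 0 ≤ j → j + (k : Int) ≤ (notes.length : Int) →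
      fcnInner1 notes note (j + (k : Int)) k j =
        j + (↑(min k ((notes.drop j.toNat).takeWhile (fun y => y == note)).length) : Int) := by
  intro k
  induction k with
  | zero => intro j h0 hb; rw [fcnInner1]; simp
  | succ k' ih =>
    intro j h0 hb
    have hj : j.toNat < notes.length := by omega
    obtain ⟨x, r, hdrop⟩ : ∃ x r, notes.drop j.toNat = x :: r := by
      cases hd : notes.drop j.toNat with
      | nil => exact absurd (List.drop_eq_nil_iff.mp hd) (by omega)
      | cons x r => exact ⟨x, r, rfl⟩
    have hx := pvGetDHead notes j x r h0 hdrop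
    have hr : notes.drop (j + 1).toNat = r := by
      rw [show (j + 1).toNat = j.toNat + 1 from by omega]
      exact pvDropSucc notes j.toNat x r hdrop
    rw [fcnInner1, if_pos (by push_cast; omega), hx, hdrop]
    by_cases hxe : (x == note) = true
    · rw [if_pos hxe,
        List.takeWhile_cons_of_pos (p := fun y => y == note) (l := r) (by simpa using hxe)]
      rw [show j + ((k' + 1 : Nat) : Int) = (j + 1) + (k' : Int) from by push_cast; ring]
      rw [ih (j + 1) (by omega) (by push_cast at hb ⊢; omega), hr]
      simp only [List.length_cons]
      push_cast
      omega
    · rw [if_neg hxe,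
        List.takeWhile_cons_of_neg (p := fun y => y == note) (l := r) (by simpa using hxe)]
      simp

-- the second inner while: advance to the end of the current run
theorem pvInner2Eq (notes : List String) (note : String) :
    ∀ (j : Int), 0 ≤ j →
      fcnInner2 notes note (notes.length : Int) (((notes.length : Int) - j).toNat) j =
        j + (((notes.drop j.toNat).takeWhile (fun y => y == note)).length : Int) := by
  intro j
  induction hN : notes.length - j.toNat using Nat.strong_induction_on generalizing j with
  | _ N ihN =>
    intro h0
    by_cases hj : j < (notes.length : Int)
    · obtain ⟨x, r, hdrop⟩ : ∃ x r, notes.drop j.toNat = x :: r := by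
        cases hd : notes.drop j.toNat with
        | nil => exact absurd (List.drop_eq_nil_iff.mp hd) (by omega)
        | cons x r => exact ⟨x, r, rfl⟩
      have hx := pvGetDHead notes j x r h0 hdrop
      have hr : notes.drop (j + 1).toNat = r := by
        rw [show (j + 1).toNat = j.toNat + 1 from by omega]
        exact pvDropSucc notes j.toNat x r hdrop
      rw [show ((notes.length : Int) - j).toNat =
          ((notes.length : Int) - (j + 1)).toNat + 1 from by omega]
      rw [fcnInner2, if_pos hj, hx, hdrop]
      by_cases hxe : (x == note) = true
      · rw [if_pos hxe,
          List.takeWhile_cons_of_pos (p := fun y => y == note) (l := r) (by simpa using hxe),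
          ihN (notes.length - (j + 1).toNat) (by omega) (j + 1) rfl (by omega), hr]
        simp only [List.length_cons]
        push_cast
        ring
      · rw [if_neg hxe,
          List.takeWhile_cons_of_neg (p := fun y => y == note) (l := r) (by simpa using hxe)]
        simp
    · have hd : notes.drop j.toNat = [] := List.drop_eq_nil_iff.mpr (by omega)
      rw [show ((notes.length : Int) - j).toNat = 0 from by omega, fcnInner2, hd]
      simp

-- outer-loop invariant: with seen = result, the scan from i adds one note per
-- qualifying run of the suffix notes.drop i.toNat, in order, skipping duplicates
theorem pvOuterEq (notes : List String) (m : Int) (hm : 1 ≤ m) :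
    ∀ (fuel : Nat) (i : Int) (result : List String), 0 ≤ i →
      ((notes.length : Int) + 1 - i - m).toNat ≤ fuel →
      fcnOuter notes m (notes.length : Int) fuel result result i =
        PySem.Set.update result (fcnRunsB m (notes.drop i.toNat)) := by
  intro fuel
  induction fuel with
  | zero =>
    intro i result h0 hb
    rw [fcnOuter]
    rw [fcnRunsB_short m (notes.drop i.toNat).length (notes.drop i.toNat) rfl (by
      simp only [List.length_drop]
      omega)]
    rfl
  | succ f ihf =>
    intro i result h0 hb
    by_cases hg : i + m ≤ (notes.length : Int)
    · obtain ⟨x, r, hdrop⟩ : ∃ x r, notes.drop i.toNat = x :: r := by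
        cases hd : notes.drop i.toNat with
        | nil => exact absurd (List.drop_eq_nil_iff.mp hd) (by omega)
        | cons x r => exact ⟨x, r, rfl⟩
      have hx := pvGetDHead notes i x r h0 hdrop
      have hr : notes.drop (i + 1).toNat = r := by
        rw [show (i + 1).toNat = i.toNat + 1 from by omega]
        exact pvDropSucc notes i.toNat x r hdrop
      have hrlen : i + 1 + (r.length : Int) = (notes.length : Int) := by
        have := congrArg List.length hdrop
        simp only [List.length_drop, List.length_cons] at this
        omega
      set t := (r.takeWhile (fun y => y == x)).length with ht
      have htle : t ≤ r.length := (List.takeWhile_sublist _ (l := r)).length_le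
      have hj1 : fcnInner1 notes x (i + m) (m - 1).toNat (i + 1) =
          (i + 1) + (↑(min (m - 1).toNat t) : Int) := by
        rw [show i + m = (i + 1) + (((m - 1).toNat : Nat) : Int) from by omega]
        rw [pvInner1Eq notes x (m - 1).toNat (i + 1) (by omega) (by omega), hr]
      have hdw : r.drop t = r.dropWhile (fun y => y == x) := by
        rw [pvDropWhileEq]
      rw [fcnOuter]
      simp only [hx]
      rw [if_pos hg, hj1, hdrop, fcnRunsB]
      by_cases hq : (m - 1).toNat ≤ t
      · -- qualifying run: the window fits inside it
        have hmin : min (m - 1).toNat t = (m - 1).toNat := by omega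
        have hbeq : ((i + 1) + (↑(min (m - 1).toNat t) : Int) == i + m) = true := by
          rw [beq_iff_eq, hmin]
          omega
        rw [if_pos hbeq]
        have hdropj1 : notes.drop ((i + 1) + (↑(min (m - 1).toNat t) : Int)).toNat =
            r.drop (m - 1).toNat := by
          rw [show ((i + 1) + (↑(min (m - 1).toNat t) : Int)).toNat =
              (i + 1).toNat + (m - 1).toNat from by omega, ← List.drop_drop, hr]
        have hi2 : fcnInner2 notes x (notes.length : Int)
            (((notes.length : Int) - ((i + 1) + (↑(min (m - 1).toNat t) : Int))).toNat)
            ((i + 1) + (↑(min (m - 1).toNat t) : Int)) = i + 1 + (t : Int) := by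
          rw [pvInner2Eq notes x _ (by omega), hdropj1,
            pvTakeWhileDrop (fun y => y == x) r (m - 1).toNat (by rw [← ht]; omega)]
          rw [← ht]
          omega
        have hdropi2 : notes.drop (i + 1 + (t : Int)).toNat =
            r.dropWhile (fun y => y == x) := by
          rw [show (i + 1 + (t : Int)).toNat = (i + 1).toNat + t from by omega,
            ← List.drop_drop, hr, hdw]
        have hcond : (1 ≤ m ∧ m ≤ ((r.takeWhile (fun y => y == x)).length : Int) + 1) := by
          constructor
          · omega
          · rw [← ht]; omega
        rw [if_pos hcond, hi2]
        by_cases hmem : PySem.Set.contains result x = true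
        · rw [if_pos hmem]
          rw [ihf (i + 1 + (t : Int)) result (by omega) (by omega), hdropi2]
          rw [List.singleton_append, PySem.Set.update_cons,
            PySem.Set.add_of_mem ((PySem.Set.contains_iff result x).mp hmem)]
        · rw [if_neg hmem]
          have hnm : x ∉ result := fun hmemx => hmem ((PySem.Set.contains_iff result x).mpr hmemx)
          rw [PySem.Set.add_of_not_mem hnm]
          rw [ihf (i + 1 + (t : Int)) (result ++ [x]) (by omega) (by omega), hdropi2]
          rw [List.singleton_append, PySem.Set.update_cons, PySem.Set.add_of_not_mem hnm]
      · -- short run: the window hits a mismatch at i + 1 + t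
        have hmin : min (m - 1).toNat t = t := by omega
        have hbeq : ((i + 1) + (↑(min (m - 1).toNat t) : Int) == i + m) = false := by
          rw [beq_eq_false_iff_ne, hmin]
          intro hc
          omega
        rw [if_neg (show ¬ ((i + 1) + (↑(min (m - 1).toNat t) : Int) == i + m) = true by
          rw [hbeq]; simp), hmin]
        have hdropi2 : notes.drop (i + 1 + (t : Int)).toNat =
            r.dropWhile (fun y => y == x) := by
          rw [show (i + 1 + (t : Int)).toNat = (i + 1).toNat + t from by omega,
            ← List.drop_drop, hr, hdw]
        rw [ihf (i + 1 + (t : Int)) result (by omega) (by omega), hdropi2]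
        rw [if_neg (by
          intro hc
          have h2 := hc.2
          rw [← ht] at h2
          omega)]
        rw [List.nil_append]
    · rw [fcnOuter, if_neg hg]
      rw [fcnRunsB_short m (notes.drop i.toNat).length (notes.drop i.toNat) rfl (by
        simp only [List.length_drop]
        omega)]
      rfl

-- ===== VERDICT (by name: the statement is the Claim_ definition above) =====
theorem filter_consecutive_notes_spec : Claim_equal_filter_consecutive_notes := by
  intro notes m _
  unfold Spec_filter_consecutive_notes
  unfold filter_consecutive_notes filter_consecutive_notes_alt
  by_cases hm : m < 1
  · rw [if_pos hm, fcnLoopA_eq_fcnRunsB, fcnRunsB_of_lt_one m hm]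
    rfl
  · rw [if_neg hm, fcnLoopA_eq_fcnRunsB]
    have h := pvOuterEq notes m (by omega) ((notes.length : Int) - m + 1).toNat 0 []
      (by omega) (by omega)
    simp only [Int.toNat_zero, List.drop_zero] at h
    rw [show (PySem.Set.empty : PySem.Set String) = ([] : List String) from rfl, h,
      PySem.Set.update_nil_left]
    simp [PySem.List.dedup_eq_ofList]
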